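-- pv_equiv track=rewrite | github.com/pgeorgis/phonUtils | phonEnv.py | join_n_fix
-- ===== SOURCE A (Python) =====
-- from itertools import combinations
--
-- PHON_ENV_SEP = "_"
--
-- def join_n_fix(value) -> set:
--     parts: list = [part for part in value.split(PHON_ENV_SEP) if part]
--     result: set = set()
--     for i in range(1, len(parts) + 1):
--         for x in combinations(parts, i):
--             result.add(PHON_ENV_SEP.join(x))
--     result.add('')
--     return result
-- ===== SOURCE B (Python) =====
-- PHON_ENV_SEP = "_"
--
-- def join_n_fix(value) -> set:
--     parts = [part for part in value.split(PHON_ENV_SEP) if part]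
--     n = len(parts)
--     indexed = list(enumerate(parts))
--     result = set()
--     # breadth-first frontier expansion: level k holds every k+1-element
--     # ordered selection as (last index, joined string)
--     frontier = indexed
--     for _ in range(n):
--         nxt = []
--         for i, s in frontier:
--             result.add(s)
--             for j, p in indexed[i + 1:]:
--                 nxt.append((j, s + PHON_ENV_SEP + p))
--         frontier = nxt
--     result.add('')
--     return result
-- ===== Notes on version B (the rewrite author's own statement) =====
-- stated objective: alternative
-- what changed: Replaces the itertools.combinations size-loop with a breadth-first frontier expansion: each level extends every (last-index, joined-string) pair by all later parts, so joins are built incrementally by reusing the previous level's strings instead of re-joining each combination from scratch.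
import Mathlib
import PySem

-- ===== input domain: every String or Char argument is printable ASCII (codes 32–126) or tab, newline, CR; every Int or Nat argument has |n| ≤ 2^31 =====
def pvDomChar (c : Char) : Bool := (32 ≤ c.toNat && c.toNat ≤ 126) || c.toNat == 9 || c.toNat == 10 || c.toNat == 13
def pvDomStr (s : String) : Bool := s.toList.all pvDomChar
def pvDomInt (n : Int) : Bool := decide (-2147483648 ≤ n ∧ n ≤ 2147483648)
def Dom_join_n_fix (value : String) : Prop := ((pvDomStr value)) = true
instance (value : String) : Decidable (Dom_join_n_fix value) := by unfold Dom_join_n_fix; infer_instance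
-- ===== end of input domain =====

-- B replaces the combinations/size-loop by a breadth-first frontier expansion that builds each
-- join by one append from its parent level (objective: alternative; same asymptotic cost).


-- ===== PORT A =====
-- itertools.combinations(l, k): the k-element subsequences, in lexicographic index order
def pvCombos {α : Type} : List α → Nat → List (List α)
  | _, 0 => [[]]
  | [], _ + 1 => []
  | x :: xs, k + 1 => (pvCombos xs k).map (x :: ·) ++ pvCombos xs (k + 1)

def join_n_fix (value : String) : List String :=
  -- value.split("_") (separator nonempty: exact) followed by the truthiness filter
  let parts : List String :=
    ((PySem.Chars.splitOn value.toList "_".toList).map String.ofList).filter (fun p => p != "")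
  let result : PySem.Set String :=
    (PySem.List.pyRange 1 ((parts.length : Int) + 1)).foldl
      (fun r i =>
        (pvCombos parts i.toNat).foldl
          (fun r x => PySem.Set.add r (PySem.Str.join "_" x)) r)
      PySem.Set.empty
  PySem.Set.add result ""

-- ===== PORT B =====
-- list(enumerate(parts)); the indices are nonnegative, kept as Nat
def pvEnum : List String → Nat → List (Nat × String)
  | [], _ => []
  | p :: ps, s => (s, p) :: pvEnum ps (s + 1)

def join_n_fix_alt (value : String) : List String :=
  let parts : List String :=
    ((PySem.Chars.splitOn value.toList "_".toList).map String.ofList).filter (fun p => p != "")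
  let n := parts.length
  let indexed := pvEnum parts 0
  let st :=
    (PySem.List.pyRange 0 (n : Int)).foldl
      (fun (st : PySem.Set String × List (Nat × String)) _ =>
        st.2.foldl
          (fun (acc : PySem.Set String × List (Nat × String)) it =>
            (PySem.Set.add acc.1 it.2,
             -- indexed[it.1 + 1 :]: the start is nonnegative, so the slice is a drop
             acc.2 ++ (indexed.drop (it.1 + 1)).map (fun jp => (jp.1, it.2 ++ "_" ++ jp.2))))
          (st.1, ([] : List (Nat × String))))
      (PySem.Set.empty, indexed)
  PySem.Set.add st.1 ""

-- ===== PRECONDITION & SPEC =====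
def Spec_join_n_fix (value : String) (out : List String) : Prop := out = join_n_fix_alt value
instance (value : String) (out : List String) : Decidable (Spec_join_n_fix value out) := by unfold Spec_join_n_fix; infer_instance

-- ===== CLAIM (what is proved, stated in full; the proofs are below) =====
def Claim_equal_join_n_fix : Prop := ∀ (value : String), Dom_join_n_fix value → Spec_join_n_fix value (join_n_fix value)

-- ===== LEMMAS AND PROOFS =====

-- one frontier-expansion step of B, and its k-fold iteration
def pvStep (indexed fr : List (Nat × String)) : List (Nat × String) :=
  fr.flatMap (fun it => (indexed.drop (it.1 + 1)).map (fun jp => (jp.1, it.2 ++ "_" ++ jp.2)))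

def pvStepN (indexed : List (Nat × String)) : Nat → List (Nat × String) → List (Nat × String)
  | 0, fr => fr
  | k + 1, fr => pvStep indexed (pvStepN indexed k fr)

-- index just after the last element of a combination (d for the empty one)
def pvAfter (c : List (Nat × String)) (d : Nat) : Nat :=
  match c.getLast? with
  | none => d
  | some e => e.1 + 1

-- a tagged combination as B represents it: (last index, joined string)
def pvTag (c : List (Nat × String)) : Nat × String :=
  ((c.getLast?.map Prod.fst).getD 0, PySem.Str.join "_" (c.map Prod.snd))

-- the strings B adds over m levels starting from frontier fr
def pvFlat (indexed : List (Nat × String)) : Nat → List (Nat × String) → List String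
  | 0, _ => []
  | m + 1, fr => fr.map Prod.snd ++ pvFlat indexed m (pvStep indexed fr)

theorem pvEnum_map_snd (l : List String) (s : Nat) : (pvEnum l s).map Prod.snd = l := by
  induction l generalizing s with
  | nil => rfl
  | cons p ps ih => simp [pvEnum, ih]

theorem pvEnum_drop (l : List String) (s d : Nat) :
    (pvEnum l s).drop d = pvEnum (l.drop d) (s + d) := by
  induction l generalizing s d with
  | nil => simp [pvEnum]
  | cons p ps ih =>
    cases d with
    | zero => simp [pvEnum]
    | succ d =>
      show (pvEnum ps (s + 1)).drop d = pvEnum (ps.drop d) (s + (d + 1))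
      rw [ih (s + 1) d]
      congr 1
      omega

theorem pvCombos_one {α : Type} (l : List α) : pvCombos l 1 = l.map ([·]) := by
  induction l with
  | nil => rfl
  | cons x xs ih => simp [pvCombos, ih]

theorem pvCombos_length {α : Type} (l : List α) (k : Nat) (c : List α)
    (hc : c ∈ pvCombos l k) : c.length = k := by
  induction l generalizing k c with
  | nil =>
    cases k with
    | zero => simp [pvCombos] at hc; simp [hc]
    | succ k => simp [pvCombos] at hc
  | cons x xs ih =>
    cases k with
    | zero => simp [pvCombos] at hc; simp [hc]
    | succ k =>
      simp only [pvCombos, List.mem_append, List.mem_map] at hc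
      rcases hc with ⟨c', hc', rfl⟩ | hc
      · simp [ih _ _ hc']
      · exact ih _ _ hc

theorem pvCombos_ne_nil {α : Type} (l : List α) (k : Nat) (c : List α)
    (hc : c ∈ pvCombos l (k + 1)) : c ≠ [] := by
  have := pvCombos_length l (k + 1) c hc
  intro h; subst h; simp at this

theorem pvCombos_map {α β : Type} (f : α → β) (l : List α) (k : Nat) :
    pvCombos (l.map f) k = (pvCombos l k).map (List.map f) := by
  induction l generalizing k with
  | nil => cases k <;> simp [pvCombos]
  | cons x xs ih =>
    cases k with
    | zero => simp [pvCombos]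
    | succ k => simp [pvCombos, ih, Function.comp_def]

theorem pvChars_join_concat (sep : List Char) (cs : List (List Char)) (c : List Char)
    (h : cs ≠ []) :
    PySem.Chars.join sep (cs ++ [c]) = PySem.Chars.join sep cs ++ sep ++ c := by
  induction cs with
  | nil => simp at h
  | cons a rest ih =>
    cases rest with
    | nil => simp [PySem.Chars.join_cons_cons, PySem.Chars.join_singleton]
    | cons b rest' =>
      have hih := ih (by simp)
      simp only [List.cons_append] at hih ⊢
      rw [PySem.Chars.join_cons_cons, PySem.Chars.join_cons_cons, hih]
      simp [List.append_assoc]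

theorem pvJoin_singleton (s : String) : PySem.Str.join "_" [s] = s := by
  rw [← String.toList_inj]
  simp [PySem.Str.toList_join, PySem.Chars.join_singleton]

theorem pvJoin_concat (xs : List String) (y : String) (h : xs ≠ []) :
    PySem.Str.join "_" (xs ++ [y]) = PySem.Str.join "_" xs ++ "_" ++ y := by
  rw [← String.toList_inj]
  simp only [PySem.Str.toList_join, List.map_append, List.map_cons, List.map_nil,
    String.toList_append]
  rw [pvChars_join_concat _ _ _ (by simpa using h)]

theorem pvAfter_nil (d : Nat) : pvAfter [] d = d := rfl

theorem pvAfter_cons_ne (x : Nat × String) (c : List (Nat × String)) (h : c ≠ []) (d d' : Nat) :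
    pvAfter (x :: c) d = pvAfter c d' := by
  obtain ⟨y, ys, rfl⟩ := List.exists_cons_of_ne_nil h
  cases hl : (y :: ys).getLast? with
  | none => simp at hl
  | some e => simp [pvAfter, List.getLast?_cons_cons, hl]

theorem pvAfter_ne (c : List (Nat × String)) (h : c ≠ []) (d d' : Nat) :
    pvAfter c d = pvAfter c d' := by
  cases hl : c.getLast? with
  | none => exact absurd (List.getLast?_eq_none_iff.mp hl) h
  | some e => simp [pvAfter, hl]

-- lexicographically ordered (k+1)-combinations = each k-combination extended by every later element
theorem pvExt_lemma (parts : List String) (l : List String) :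
    ∀ (d k : Nat), parts.drop d = l →
      pvCombos ((pvEnum parts 0).drop d) (k + 1) =
        (pvCombos ((pvEnum parts 0).drop d) k).flatMap
          (fun c => ((pvEnum parts 0).drop (pvAfter c d)).map (fun e => c ++ [e])) := by
  induction l with
  | nil =>
    intro d k h
    have hd : (pvEnum parts 0).drop d = [] := by
      rw [pvEnum_drop, h]; rfl
    rw [hd]
    cases k with
    | zero =>
      show ([] : List (List (Nat × String))) =
        ([[]] : List (List (Nat × String))).flatMap
          (fun c => ((pvEnum parts 0).drop (pvAfter c d)).map (fun e => c ++ [e]))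
      rw [List.flatMap_cons, List.flatMap_nil, List.append_nil, pvAfter_nil, hd]
      rfl
    | succ k => simp [pvCombos]
  | cons p ps ih =>
    intro d k h
    have hps : parts.drop (d + 1) = ps := by
      rw [← List.tail_drop, h]; rfl
    have hE : (pvEnum parts 0).drop d = (d, p) :: pvEnum ps (d + 1) := by
      rw [pvEnum_drop, h]; simp [pvEnum]
    have hE' : (pvEnum parts 0).drop (d + 1) = pvEnum ps (d + 1) := by
      rw [pvEnum_drop, hps]; simp
    rw [hE]
    cases k with
    | zero =>
      simp only [pvCombos, List.flatMap_cons, List.flatMap_nil, List.append_nil,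
        pvAfter_nil, hE]
      simp [pvCombos_one]
    | succ k =>
      -- LHS: pvCombos ((d,p) :: T) (k+2)
      show (pvCombos (pvEnum ps (d + 1)) (k + 1)).map ((d, p) :: ·) ++
            pvCombos (pvEnum ps (d + 1)) (k + 2) = _
      rw [show pvCombos ((d, p) :: pvEnum ps (d + 1)) (k + 1) =
            (pvCombos (pvEnum ps (d + 1)) k).map ((d, p) :: ·) ++
              pvCombos (pvEnum ps (d + 1)) (k + 1) from rfl]
      rw [List.flatMap_append, List.flatMap_map]
      have hsecond :
          (pvCombos (pvEnum ps (d + 1)) (k + 1)).flatMap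
              (fun c => ((pvEnum parts 0).drop (pvAfter c d)).map (fun e => c ++ [e])) =
            pvCombos (pvEnum ps (d + 1)) (k + 2) := by
        have hcongr :
            (pvCombos (pvEnum ps (d + 1)) (k + 1)).flatMap
                (fun c => ((pvEnum parts 0).drop (pvAfter c d)).map (fun e => c ++ [e])) =
              (pvCombos (pvEnum ps (d + 1)) (k + 1)).flatMap
                (fun c => ((pvEnum parts 0).drop (pvAfter c (d + 1))).map (fun e => c ++ [e])) := by
          refine List.flatMap_congr (fun c hc => ?_)
          rw [pvAfter_ne c (pvCombos_ne_nil _ _ _ hc) d (d + 1)]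
        rw [hcongr]
        have := ih (d + 1) (k + 1) hps
        rw [hE'] at this
        exact this.symm
      rw [hsecond]
      have hfirst :
          (pvCombos (pvEnum ps (d + 1)) k).flatMap
              (fun c => ((pvEnum parts 0).drop (pvAfter ((d, p) :: c) d)).map
                (fun e => (d, p) :: c ++ [e])) =
            ((pvCombos (pvEnum ps (d + 1)) k).flatMap
              (fun c => ((pvEnum parts 0).drop (pvAfter c (d + 1))).map (fun e => c ++ [e]))).map
                ((d, p) :: ·) := by
        rw [List.map_flatMap]
        refine List.flatMap_congr (fun c _ => ?_)
        rcases eq_or_ne c [] with rfl | hc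
        · rw [List.map_map]
          have h1 : pvAfter [(d, p)] d = d + 1 := by simp [pvAfter]
          have h2 : pvAfter ([] : List (Nat × String)) (d + 1) = d + 1 := rfl
          rw [h1, h2]
          simp [Function.comp_def]
        · rw [pvAfter_cons_ne (d, p) c hc d (d + 1), List.map_map]
          rfl
      rw [hfirst]
      have := ih (d + 1) k hps
      rw [hE'] at this
      rw [← this]

-- one B step on a tagged level = the next tagged level
theorem pvStep_level (parts : List String) (m : Nat) :
    pvStep (pvEnum parts 0) ((pvCombos (pvEnum parts 0) (m + 1)).map pvTag) =
      (pvCombos (pvEnum parts 0) (m + 2)).map pvTag := by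
  have hext := pvExt_lemma parts parts 0 (m + 1) (by simp)
  simp only [List.drop_zero] at hext
  rw [pvStep, List.flatMap_map, show m + 2 = (m + 1) + 1 from rfl, hext, List.map_flatMap]
  refine List.flatMap_congr (fun c hc => ?_)
  have hne : c ≠ [] := pvCombos_ne_nil _ _ _ hc
  obtain ⟨e, he⟩ : ∃ e, c.getLast? = some e := by
    cases hl : c.getLast? with
    | none => exact absurd (List.getLast?_eq_none_iff.mp hl) hne
    | some e => exact ⟨e, rfl⟩
  have hafter : pvAfter c 0 = e.1 + 1 := by simp [pvAfter, he]
  have htag1 : (pvTag c).1 = e.1 := by simp [pvTag, he]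
  rw [hafter, htag1, List.map_map]
  refine List.map_congr_left (fun e' _ => ?_)
  have hmapne : c.map Prod.snd ≠ [] := by simpa using hne
  show (e'.1, (pvTag c).2 ++ "_" ++ e'.2) = pvTag (c ++ [e'])
  simp [pvTag, pvJoin_concat _ _ hmapne, he]

theorem pvStepN_succ_comm (indexed : List (Nat × String)) (k : Nat) (fr : List (Nat × String)) :
    pvStepN indexed (k + 1) fr = pvStepN indexed k (pvStep indexed fr) := by
  induction k generalizing fr with
  | zero => rfl
  | succ k ih =>
    show pvStep indexed (pvStepN indexed (k + 1) fr) =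
      pvStepN indexed (k + 1) (pvStep indexed fr)
    rw [ih fr]
    rfl

theorem pvStepN_level (parts : List String) (k : Nat) :
    pvStepN (pvEnum parts 0) k (pvEnum parts 0) =
      (pvCombos (pvEnum parts 0) (k + 1)).map pvTag := by
  induction k with
  | zero =>
    show pvEnum parts 0 = _
    rw [pvCombos_one, List.map_map]
    refine ((List.map_congr_left (fun e _ => ?_)).trans (List.map_id _)).symm
    show pvTag [e] = e
    simp [pvTag, pvJoin_singleton]
  | succ k ih =>
    show pvStep (pvEnum parts 0) (pvStepN (pvEnum parts 0) k (pvEnum parts 0)) = _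
    rw [ih, pvStep_level]

theorem pvInner (indexed fr : List (Nat × String)) (r : PySem.Set String)
    (l0 : List (Nat × String)) :
    fr.foldl
      (fun (acc : PySem.Set String × List (Nat × String)) it =>
        (PySem.Set.add acc.1 it.2,
         acc.2 ++ (indexed.drop (it.1 + 1)).map (fun jp => (jp.1, it.2 ++ "_" ++ jp.2))))
      (r, l0) =
      (List.foldl PySem.Set.add r (fr.map Prod.snd), l0 ++ pvStep indexed fr) := by
  induction fr generalizing r l0 with
  | nil => simp [pvStep]
  | cons it fr ih =>
    simp only [List.foldl_cons]
    rw [ih]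
    simp [pvStep, List.append_assoc]

theorem pvOuter (indexed : List (Nat × String)) (ns : List Int) (r : PySem.Set String)
    (fr : List (Nat × String)) :
    ns.foldl
      (fun (st : PySem.Set String × List (Nat × String)) _ =>
        st.2.foldl
          (fun (acc : PySem.Set String × List (Nat × String)) it =>
            (PySem.Set.add acc.1 it.2,
             acc.2 ++ (indexed.drop (it.1 + 1)).map (fun jp => (jp.1, it.2 ++ "_" ++ jp.2))))
          (st.1, ([] : List (Nat × String))))
      (r, fr) =
      (List.foldl PySem.Set.add r (pvFlat indexed ns.length fr),
        pvStepN indexed ns.length fr) := by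
  induction ns generalizing r fr with
  | nil => simp [pvFlat, pvStepN]
  | cons n ns ih =>
    simp only [List.foldl_cons, List.length_cons]
    rw [pvInner, List.nil_append, ih]
    rw [show pvFlat indexed (ns.length + 1) fr =
          fr.map Prod.snd ++ pvFlat indexed ns.length (pvStep indexed fr) from rfl]
    rw [List.foldl_append, pvStepN_succ_comm]

theorem pvFlat_levels (indexed : List (Nat × String)) (m : Nat) (fr : List (Nat × String)) :
    pvFlat indexed m fr =
      (List.range m).flatMap (fun k => (pvStepN indexed k fr).map Prod.snd) := by
  induction m generalizing fr with
  | zero => simp [pvFlat]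
  | succ m ih =>
    simp only [pvFlat, ih, List.range_succ_eq_map, List.flatMap_cons, List.flatMap_map]
    show (pvStepN indexed 0 fr).map Prod.snd ++ _ = _
    congr 1
    exact (List.flatMap_congr (fun k _ => by
      rw [Nat.succ_eq_add_one, pvStepN_succ_comm])).symm

-- the common sequence of added strings
theorem pvCore (parts : List String) :
    PySem.Set.add
      ((PySem.List.pyRange 1 ((parts.length : Int) + 1)).foldl
        (fun r i =>
          (pvCombos parts i.toNat).foldl
            (fun r x => PySem.Set.add r (PySem.Str.join "_" x)) r)
        PySem.Set.empty) "" =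
    PySem.Set.add
      ((PySem.List.pyRange 0 ((parts.length : Int))).foldl
        (fun (st : PySem.Set String × List (Nat × String)) _ =>
          st.2.foldl
            (fun (acc : PySem.Set String × List (Nat × String)) it =>
              (PySem.Set.add acc.1 it.2,
               acc.2 ++ ((pvEnum parts 0).drop (it.1 + 1)).map
                 (fun jp => (jp.1, it.2 ++ "_" ++ jp.2))))
            (st.1, ([] : List (Nat × String))))
        (PySem.Set.empty, pvEnum parts 0)).1 "" := by
  have hA :
      (PySem.List.pyRange 1 ((parts.length : Int) + 1)).foldl
        (fun r i =>
          (pvCombos parts i.toNat).foldl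
            (fun r x => PySem.Set.add r (PySem.Str.join "_" x)) r)
        PySem.Set.empty =
      List.foldl PySem.Set.add PySem.Set.empty
        ((List.range parts.length).flatMap
          (fun k => (pvCombos parts (k + 1)).map (PySem.Str.join "_"))) := by
    rw [PySem.List.pyRange_one]
    have h1 : (((parts.length : Int) + 1) - 1).toNat = parts.length := by omega
    rw [h1]
    simp only [List.foldl_map]
    have hfun :
        (fun (x : PySem.Set String) (y : Nat) =>
          (pvCombos parts ((1 + (y : Int))).toNat).foldl
            (fun r x => PySem.Set.add r (PySem.Str.join "_" x)) x) =
        (fun (x : PySem.Set String) (y : Nat) =>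
          ((pvCombos parts (y + 1)).map (PySem.Str.join "_")).foldl PySem.Set.add x) := by
      funext x y
      have hk : ((1 : Int) + (y : Int)).toNat = y + 1 := by omega
      rw [hk, List.foldl_map]
    rw [hfun, List.foldl_flatMap]
  have hB := pvOuter (pvEnum parts 0) (PySem.List.pyRange 0 ((parts.length : Int)))
      PySem.Set.empty (pvEnum parts 0)
  have hlen : (PySem.List.pyRange 0 ((parts.length : Int))).length = parts.length := by
    rw [PySem.List.length_pyRange_one]; omega
  have hlev : ∀ k : Nat,
      (pvStepN (pvEnum parts 0) k (pvEnum parts 0)).map Prod.snd =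
        (pvCombos parts (k + 1)).map (PySem.Str.join "_") := by
    intro k
    rw [pvStepN_level, List.map_map]
    have hmk : pvCombos parts (k + 1) =
        (pvCombos (pvEnum parts 0) (k + 1)).map (List.map Prod.snd) := by
      rw [← pvCombos_map, pvEnum_map_snd]
    rw [hmk, List.map_map]
    rfl
  rw [hA, hB, hlen]
  show _ = PySem.Set.add
      (List.foldl PySem.Set.add PySem.Set.empty
        (pvFlat (pvEnum parts 0) parts.length (pvEnum parts 0))) ""
  refine congrArg (fun r => PySem.Set.add r "") ?_
  rw [pvFlat_levels]
  exact congrArg (List.foldl PySem.Set.add PySem.Set.empty)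
    (List.flatMap_congr (fun k _ => hlev k)).symm

-- ===== VERDICT (by name: the statement is the Claim_ definition above) =====
theorem join_n_fix_spec : Claim_equal_join_n_fix := by
  intro value _
  unfold Spec_join_n_fix join_n_fix join_n_fix_alt
  exact pvCore _
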